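-- pv_equiv track=rewrite | github.com/yffbit/PolyominoSolver | test/tetromino.py | transform
-- ===== SOURCE A (Python) =====
-- def transform(src, row, col, type):
--     res = [src[i*col:(i+1)*col] for i in range(row)]
--     if type % 2:# 水平镜像
--         for i in range(row):
--             res[i].reverse()
--     type = type // 2
--     if type % 2:# 垂直镜像
--         res.reverse()
--     type = type // 2
--     if type % 2 and row == col:# 转置
--         res = [[res[i][j] for i in range(row)] for j in range(col)]
--     res1 = []
--     for i in range(row):
--         res1.extend(res[i])
--     return res1
-- ===== SOURCE B (Python) =====
-- def transform(src, row, col, type):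
--     hflip = type % 2 == 1
--     vflip = (type // 2) % 2 == 1
--     if (type // 4) % 2 == 1 and row == col:
--         # square transpose: emit the output directly through a closed-form index map
--         out = []
--         for i in range(row):
--             for j in range(row):
--                 si = row - 1 - j if vflip else j
--                 sj = row - 1 - i if hflip else i
--                 out.append(src[si * row + sj])
--         return out
--     # no transpose: emit rows in the required order, each segment flipped on the fly
--     order = reversed(range(row)) if vflip else range(row)
--     rows = []
--     for i in order:
--         seg = src[i * col:(i + 1) * col]
--         rows.append(seg[::-1] if hflip else seg)
--     return [x for r in rows for x in r]
-- ===== Notes on version B (the rewrite author's own statement) =====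
-- stated objective: alternative
-- what changed: B decodes the transform bits up front and, instead of A's build-rows / mutate-in-place / index-transpose / flatten pipeline, emits the square-transpose case directly through a closed-form source-index map and otherwise produces the flattened result in one mutation-free pass over the row order (no intermediate grid mutation).
import Mathlib
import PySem

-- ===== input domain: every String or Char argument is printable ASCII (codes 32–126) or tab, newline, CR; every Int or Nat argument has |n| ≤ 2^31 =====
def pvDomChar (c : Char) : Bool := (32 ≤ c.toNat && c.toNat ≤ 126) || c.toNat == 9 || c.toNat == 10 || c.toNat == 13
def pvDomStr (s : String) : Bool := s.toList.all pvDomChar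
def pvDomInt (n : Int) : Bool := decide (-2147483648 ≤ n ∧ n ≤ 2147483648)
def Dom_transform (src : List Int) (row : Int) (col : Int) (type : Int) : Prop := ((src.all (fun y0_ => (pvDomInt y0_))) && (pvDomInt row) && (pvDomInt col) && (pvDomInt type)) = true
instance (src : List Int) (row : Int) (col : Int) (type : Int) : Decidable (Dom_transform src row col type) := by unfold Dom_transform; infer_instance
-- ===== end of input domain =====

-- B replaces A's build-rows / mutate-in-place / transpose / flatten pipeline by: a closed-form
-- index map for the square-transpose case, and otherwise one mutation-free pass emitting the row
-- segments in the required order (objective: alternative).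


-- ===== PORT A =====
def transform (src : List Int) (row : Int) (col : Int) (type : Int) : List Int :=
  let res := (PySem.List.pyRange 0 row 1).map
    (fun i => PySem.List.slice src (some (i * col)) (some ((i + 1) * col)))
  let res := if PySem.Int.mod type 2 ≠ 0 then
      (PySem.List.pyRange 0 row 1).foldl
        (fun r i => PySem.List.pySetD r i ((PySem.List.pyGetD r i []).reverse)) res
    else res
  let type1 := PySem.Int.floordiv type 2
  let res := if PySem.Int.mod type1 2 ≠ 0 then res.reverse else res
  let type2 := PySem.Int.floordiv type1 2
  let res := if PySem.Int.mod type2 2 ≠ 0 ∧ row = col then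
      (PySem.List.pyRange 0 col 1).map (fun j =>
        (PySem.List.pyRange 0 row 1).map (fun i =>
          PySem.List.pyGetD (PySem.List.pyGetD res i []) j 0))
    else res
  (PySem.List.pyRange 0 row 1).foldl (fun r1 i => r1 ++ PySem.List.pyGetD res i []) []

-- ===== PORT B =====
-- zip(*rows) is ported as List.transpose-free direct index map (the trans branch); seg[::-1] via slice?.
def transform_alt (src : List Int) (row : Int) (col : Int) (type : Int) : List Int :=
  let hflip := PySem.Int.mod type 2 = 1
  let vflip := PySem.Int.mod (PySem.Int.floordiv type 2) 2 = 1
  if PySem.Int.mod (PySem.Int.floordiv type 4) 2 = 1 ∧ row = col then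
    (PySem.List.pyRange 0 row 1).foldl (fun out i =>
      (PySem.List.pyRange 0 row 1).foldl (fun out j =>
        let si := if vflip then row - 1 - j else j
        let sj := if hflip then row - 1 - i else i
        out ++ [PySem.List.pyGetD src (si * row + sj) 0]) out) []
  else
    let order := if vflip then (PySem.List.pyRange 0 row 1).reverse else PySem.List.pyRange 0 row 1
    let rows := order.foldl (fun rows i =>
      let seg := PySem.List.slice src (some (i * col)) (some ((i + 1) * col))
      rows ++ [if hflip then (PySem.List.slice? seg none none (-1)).getD [] else seg]) []
    rows.flatMap (fun r => r)

-- ===== PRECONDITION & SPEC =====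
-- Pre_ excludes exactly the inputs on which A raises IndexError: transpose requested on a square
-- grid whose flat source is shorter than row*col (B's direct indexing raises there as well).
def Pre_transform (src : List Int) (row : Int) (col : Int) (type : Int) : Prop :=
  ¬ ((type / 4) % 2 = 1 ∧ row = col ∧ 0 < row ∧ (src.length : Int) < row * col)
instance (src : List Int) (row : Int) (col : Int) (type : Int) : Decidable (Pre_transform src row col type) := by unfold Pre_transform; infer_instance
def pvWitness_transform : List Int × Int × Int × Int := ([1, 2, 3, 4, 5, 6], 2, 3, 1)
def Spec_transform (src : List Int) (row : Int) (col : Int) (type : Int) (out : List Int) : Prop := out = transform_alt src row col type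
instance (src : List Int) (row : Int) (col : Int) (type : Int) (out : List Int) : Decidable (Spec_transform src row col type out) := by unfold Spec_transform; infer_instance

-- ===== CLAIM (what is proved, stated in full; the proofs are below) =====
def Claim_equal_transform : Prop := ∀ (src : List Int) (row : Int) (col : Int) (type : Int), Dom_transform src row col type → Pre_transform src row col type → Spec_transform src row col type (transform src row col type)

-- ===== LEMMAS AND PROOFS =====

-- reversing a range-indexed map flips the index
theorem rev_map_range {α : Type} (n : Nat) (f : Nat → α) :
    ((List.range n).map f).reverse = (List.range n).map (fun i => f (n - 1 - i)) := by
  apply List.ext_getElem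
  · simp
  · intro i h1 h2
    simp only [List.length_reverse, List.length_map, List.length_range] at h1
    rw [List.getElem_reverse]
    simp [h1]

theorem flatten_map {α β : Type} (l : List α) (f : α → List β) :
    (l.map f).flatten = l.flatMap f := rfl

-- Python's `for i in range(len(g)): g[i].reverse()` leaves `g.map reverse`
theorem foldl_set_rev {α : Type} (g : List (List α)) (k : Nat) (hk : k ≤ g.length) :
    (List.range k).foldl (fun a t => a.set t ((a.getD t []).reverse)) g
      = (g.take k).map List.reverse ++ g.drop k := by
  induction k with
  | zero => simp
  | succ k ih =>
    rw [List.range_succ, List.foldl_append]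
    rw [ih (by omega)]
    have hk' : k < g.length := by omega
    have hmin : min k g.length = k := by omega
    have hlenL : (((g.take k).map List.reverse)).length = k := by simp; omega
    have hget : (((g.take k).map List.reverse ++ g.drop k).getD k []) = g[k] := by
      rw [List.getD_eq_getElem _ _ (by simp; omega)]
      rw [List.getElem_append_right (by omega)]
      simp [hmin]
    simp only [List.foldl_cons, List.foldl_nil]
    rw [hget]
    rw [List.set_append_right _ _ (by omega)]
    rw [hlenL, Nat.sub_self]
    rw [List.drop_eq_getElem_cons hk']
    rw [List.set_cons_zero]
    have hts : List.take (k+1) g = List.take k g ++ [g[k]] := by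
      rw [List.take_add_one, List.getElem?_eq_getElem hk']
      simp
    rw [hts, List.map_append]
    simp

theorem entry_take_drop (src : List Int) (r c i j : Nat) (hsz : r * c ≤ src.length)
    (hi : i < r) (hj : j < c) :
    ((src.drop (i * c)).take c).getD j 0 = src.getD (i * c + j) 0 := by
  have hb : i * c + c ≤ r * c := by
    have := Nat.succ_le_of_lt hi
    calc i * c + c = (i+1) * c := by ring
    _ ≤ r * c := Nat.mul_le_mul_right c this
  have h1 : j < ((src.drop (i * c)).take c).length := by simp; omega
  rw [List.getD_eq_getElem _ _ h1, List.getD_eq_getElem _ _ (by omega)]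
  rw [List.getElem_take, List.getElem_drop]

theorem entry_take_drop_rev (src : List Int) (r c i j : Nat) (hsz : r * c ≤ src.length)
    (hi : i < r) (hj : j < c) :
    (((src.drop (i * c)).take c).reverse).getD j 0 = src.getD (i * c + (c - 1 - j)) 0 := by
  have hb : i * c + c ≤ r * c := by
    have := Nat.succ_le_of_lt hi
    calc i * c + c = (i+1) * c := by ring
    _ ≤ r * c := Nat.mul_le_mul_right c this
  have hlt : ((src.drop (i * c)).take c).length = c := by simp; omega
  rw [List.getD_eq_getElem _ _ (by simp [hlt]; omega), List.getD_eq_getElem _ _ (by omega)]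
  rw [List.getElem_reverse]
  simp only [List.getElem_take, List.getElem_drop, hlt]

-- stage reductions of A's pipeline
theorem LA0 (src : List Int) (r c : Nat) :
    (PySem.List.pyRange 0 (r:Int)).map
      (fun i => PySem.List.slice src (some (i * (c:Int))) (some ((i + 1) * (c:Int))))
    = (List.range r).map (fun i => (src.drop (i * c)).take c) := by
  rw [PySem.List.pyRange_zero_natCast, List.map_map]
  try apply List.map_congr_left
  intro k _
  simp only [Function.comp]
  rw [show ((k:Int)) * (c:Int) = ((k*c : Nat):Int) by push_cast; ring,
      show ((k:Int)+1) * (c:Int) = ((k*c : Nat):Int) + ((c:Nat):Int) by push_cast; ring]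
  exact PySem.List.slice_natCast_add src (k*c) c

theorem LA1 (g : List (List Int)) (r : Nat) (h : g.length = r) :
    (PySem.List.pyRange 0 (r:Int)).foldl
      (fun a i => PySem.List.pySetD a i ((PySem.List.pyGetD a i []).reverse)) g
    = g.map List.reverse := by
  rw [PySem.List.pyRange_zero_natCast, List.foldl_map]
  simp only [PySem.List.pySetD_natCast, PySem.List.pyGetD_natCast]
  rw [← h, foldl_set_rev g g.length (le_refl _)]
  simp

theorem LA3 (f : Nat → List Int) (r c : Nat) :
    (PySem.List.pyRange 0 (c:Int)).map (fun j =>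
      (PySem.List.pyRange 0 (r:Int)).map (fun i =>
        PySem.List.pyGetD (PySem.List.pyGetD ((List.range r).map f) i []) j 0))
    = (List.range c).map (fun j => (List.range r).map (fun i => (f i).getD j 0)) := by
  simp only [PySem.List.pyRange_zero_natCast, List.map_map]
  try apply List.map_congr_left
  intro j _
  simp only [Function.comp]
  try apply List.map_congr_left
  intro i hi
  simp only [Function.comp, PySem.List.pyGetD_natCast]
  rw [PySem.List.getD_map_range _ _ _ _ (List.mem_range.mp hi)]

theorem LA4 (g : List (List Int)) (r : Nat) (h : g.length = r) :
    (PySem.List.pyRange 0 (r:Int)).foldl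
      (fun r1 i => r1 ++ PySem.List.pyGetD g i []) []
    = g.flatten := by
  rw [PySem.List.pyRange_zero_natCast, List.foldl_map]
  rw [PySem.List.foldl_append_eq_flatMap]
  simp only [List.nil_append, PySem.List.pyGetD_natCast]
  have hg : (List.range r).map (fun t => g.getD t []) = g := by
    apply List.ext_getElem
    · simp [h]
    · intro i h1 h2
      simp only [List.length_map, List.length_range] at h1
      simp only [List.getElem_map, List.getElem_range]
      rw [List.getD_eq_getElem _ _ (by omega)]
  conv_rhs => rw [← hg]
  rw [flatten_map]

theorem transform_eq_alt (src : List Int) (row col type : Int)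
    (hpre : Pre_transform src row col type) :
    transform src row col type = transform_alt src row col type := by
  have e1 : PySem.Int.mod type 2 = type % 2 := PySem.Int.mod_eq_emod_of_pos (by norm_num)
  have d2 : PySem.Int.floordiv type 2 = type / 2 := PySem.Int.floordiv_eq_ediv_of_pos (by norm_num)
  have e2 : PySem.Int.mod (PySem.Int.floordiv type 2) 2 = (type/2) % 2 := by
    rw [d2]; exact PySem.Int.mod_eq_emod_of_pos (by norm_num)
  have e3 : PySem.Int.mod (PySem.Int.floordiv (PySem.Int.floordiv type 2) 2) 2 = (type/2/2) % 2 := by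
    rw [d2, PySem.Int.floordiv_eq_ediv_of_pos (by norm_num : (0:Int) < 2)]
    exact PySem.Int.mod_eq_emod_of_pos (by norm_num)
  have e4 : PySem.Int.mod (PySem.Int.floordiv type 4) 2 = (type/2/2) % 2 := by
    rw [PySem.Int.floordiv_eq_ediv_of_pos (by norm_num : (0:Int) < 4),
        show type/4 = type/2/2 by omega]
    exact PySem.Int.mod_eq_emod_of_pos (by norm_num)
  simp only [transform, transform_alt, e1, e2, e3, e4]
  rcases Int.emod_two_eq type with h1 | h1 <;>
    rcases Int.emod_two_eq (type/2) with h2 | h2 <;>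
      rcases Int.emod_two_eq (type/2/2) with h3 | h3 <;>
        simp only [h1, h2, h3, ne_eq, one_ne_zero, zero_ne_one, not_true_eq_false,
          not_false_eq_true, ite_true, ite_false, false_and, true_and, and_false, and_true]
  -- branch (hflip=False, vflip=False, transpose_bit=False)
  · by_cases hrow : 0 < row
    · obtain ⟨r, rfl⟩ := Int.eq_ofNat_of_zero_le (le_of_lt hrow)
      rw [LA4 _ r (by simp [PySem.List.length_pyRange_one])]
      simp only [PySem.List.pyRange_zero_natCast, List.map_map,
        PySem.List.foldl_append_singleton_eq_map, List.nil_append, List.flatMap_id',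
        rev_map_range, PySem.List.slice?_none_none_neg_one, Option.getD_some, List.map_map]
      try apply congrArg List.flatten
      try apply List.map_congr_left
      try intro k hk
      try simp only [Function.comp]
      try rfl
    · have hnil : PySem.List.pyRange 0 row 1 = [] := PySem.List.pyRange_one_eq_nil (by omega)
      simp [hnil]
  -- branch (hflip=False, vflip=False, transpose_bit=True)
  · by_cases hrc : row = col
    · subst hrc
      simp only [eq_self_iff_true, ite_true]
      by_cases hrow : 0 < row
      · obtain ⟨n, rfl⟩ := Int.eq_ofNat_of_zero_le (le_of_lt hrow)
        have hge : n * n ≤ src.length := by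
          by_contra hlt
          push_neg at hlt
          apply hpre
          refine ⟨by omega, rfl, by exact_mod_cast hrow, ?_⟩
          calc (src.length : Int) < ((n*n : Nat) : Int) := by exact_mod_cast hlt
            _ = (n:Int) * (n:Int) := by push_cast; ring
        rw [LA4 _ n (by simp [PySem.List.length_pyRange_one])]
        rw [LA0]
        rw [LA3]
        rw [flatten_map]
        simp only [PySem.List.foldl_append_singleton_eq_map, PySem.List.foldl_append_eq_flatMap,
          List.nil_append, PySem.List.pyRange_zero_natCast, List.flatMap_map, List.map_map]
        apply List.flatMap_congr
        intro a ha
        have ha' : a < n := List.mem_range.mp ha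
        try apply List.map_congr_left
        intro b hb
        have hb' : b < n := List.mem_range.mp hb
        try simp only [Function.comp]
        rw [entry_take_drop src n n b a hge hb' ha']
        rw [show (b:Int) * (n:Int) + (a:Int) = ((b * n + a : Nat) : Int) by push_cast; ring,
          PySem.List.pyGetD_natCast]
      · have hnil : PySem.List.pyRange 0 row 1 = [] := PySem.List.pyRange_one_eq_nil (by omega)
        simp [hnil]
    · simp only [hrc, if_false, ite_false]
      by_cases hrow : 0 < row
      · obtain ⟨r, rfl⟩ := Int.eq_ofNat_of_zero_le (le_of_lt hrow)
        rw [LA4 _ r (by simp [PySem.List.length_pyRange_one])]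
        simp only [PySem.List.pyRange_zero_natCast, List.map_map,
          PySem.List.foldl_append_singleton_eq_map, List.nil_append, List.flatMap_id',
          rev_map_range, PySem.List.slice?_none_none_neg_one, Option.getD_some, List.map_map]
        try apply congrArg List.flatten
        try apply List.map_congr_left
        try intro k hk
        try simp only [Function.comp]
        try rfl
      · have hnil : PySem.List.pyRange 0 row 1 = [] := PySem.List.pyRange_one_eq_nil (by omega)
        simp [hnil]
  -- branch (hflip=False, vflip=True, transpose_bit=False)
  · by_cases hrow : 0 < row
    · obtain ⟨r, rfl⟩ := Int.eq_ofNat_of_zero_le (le_of_lt hrow)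
      rw [LA4 _ r (by simp [PySem.List.length_pyRange_one])]
      simp only [PySem.List.pyRange_zero_natCast, List.map_map,
        PySem.List.foldl_append_singleton_eq_map, List.nil_append, List.flatMap_id',
        rev_map_range, PySem.List.slice?_none_none_neg_one, Option.getD_some, List.map_map]
      try apply congrArg List.flatten
      try apply List.map_congr_left
      try intro k hk
      try simp only [Function.comp]
      try rfl
    · have hnil : PySem.List.pyRange 0 row 1 = [] := PySem.List.pyRange_one_eq_nil (by omega)
      simp [hnil]
  -- branch (hflip=False, vflip=True, transpose_bit=True)
  · by_cases hrc : row = col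
    · subst hrc
      simp only [eq_self_iff_true, ite_true]
      by_cases hrow : 0 < row
      · obtain ⟨n, rfl⟩ := Int.eq_ofNat_of_zero_le (le_of_lt hrow)
        have hge : n * n ≤ src.length := by
          by_contra hlt
          push_neg at hlt
          apply hpre
          refine ⟨by omega, rfl, by exact_mod_cast hrow, ?_⟩
          calc (src.length : Int) < ((n*n : Nat) : Int) := by exact_mod_cast hlt
            _ = (n:Int) * (n:Int) := by push_cast; ring
        rw [LA4 _ n (by simp [PySem.List.length_pyRange_one])]
        rw [LA0]
        rw [rev_map_range]
        rw [LA3]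
        rw [flatten_map]
        simp only [PySem.List.foldl_append_singleton_eq_map, PySem.List.foldl_append_eq_flatMap,
          List.nil_append, PySem.List.pyRange_zero_natCast, List.flatMap_map, List.map_map]
        apply List.flatMap_congr
        intro a ha
        have ha' : a < n := List.mem_range.mp ha
        try apply List.map_congr_left
        intro b hb
        have hb' : b < n := List.mem_range.mp hb
        try simp only [Function.comp]
        rw [entry_take_drop src n n (n - 1 - b) a hge (by omega) ha']
        have a1 : (((n - 1 - b : Nat)) : Int) = (n:Int) - 1 - (b:Int) := by omega
        rw [show ((n:Int) - 1 - (b:Int)) * (n:Int) + (a:Int) = (((n - 1 - b) * n + a : Nat) : Int) by push_cast [a1]; ring,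
          PySem.List.pyGetD_natCast]
      · have hnil : PySem.List.pyRange 0 row 1 = [] := PySem.List.pyRange_one_eq_nil (by omega)
        simp [hnil]
    · simp only [hrc, if_false, ite_false]
      by_cases hrow : 0 < row
      · obtain ⟨r, rfl⟩ := Int.eq_ofNat_of_zero_le (le_of_lt hrow)
        rw [LA4 _ r (by simp [PySem.List.length_pyRange_one])]
        simp only [PySem.List.pyRange_zero_natCast, List.map_map,
          PySem.List.foldl_append_singleton_eq_map, List.nil_append, List.flatMap_id',
          rev_map_range, PySem.List.slice?_none_none_neg_one, Option.getD_some, List.map_map]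
        try apply congrArg List.flatten
        try apply List.map_congr_left
        try intro k hk
        try simp only [Function.comp]
        try rfl
      · have hnil : PySem.List.pyRange 0 row 1 = [] := PySem.List.pyRange_one_eq_nil (by omega)
        simp [hnil]
  -- branch (hflip=True, vflip=False, transpose_bit=False)
  · by_cases hrow : 0 < row
    · obtain ⟨r, rfl⟩ := Int.eq_ofNat_of_zero_le (le_of_lt hrow)
      rw [LA1 _ r (by simp [PySem.List.length_pyRange_one])]
      rw [LA4 _ r (by simp [PySem.List.length_pyRange_one])]
      simp only [PySem.List.pyRange_zero_natCast, List.map_map,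
        PySem.List.foldl_append_singleton_eq_map, List.nil_append, List.flatMap_id',
        rev_map_range, PySem.List.slice?_none_none_neg_one, Option.getD_some, List.map_map]
      try apply congrArg List.flatten
      try apply List.map_congr_left
      try intro k hk
      try simp only [Function.comp]
      try rfl
    · have hnil : PySem.List.pyRange 0 row 1 = [] := PySem.List.pyRange_one_eq_nil (by omega)
      simp [hnil]
  -- branch (hflip=True, vflip=False, transpose_bit=True)
  · by_cases hrc : row = col
    · subst hrc
      simp only [eq_self_iff_true, ite_true]
      by_cases hrow : 0 < row
      · obtain ⟨n, rfl⟩ := Int.eq_ofNat_of_zero_le (le_of_lt hrow)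
        have hge : n * n ≤ src.length := by
          by_contra hlt
          push_neg at hlt
          apply hpre
          refine ⟨by omega, rfl, by exact_mod_cast hrow, ?_⟩
          calc (src.length : Int) < ((n*n : Nat) : Int) := by exact_mod_cast hlt
            _ = (n:Int) * (n:Int) := by push_cast; ring
        rw [LA4 _ n (by simp [PySem.List.length_pyRange_one])]
        rw [LA0]
        rw [LA1 _ n (by simp)]
        simp only [List.map_map]
        rw [LA3]
        rw [flatten_map]
        simp only [PySem.List.foldl_append_singleton_eq_map, PySem.List.foldl_append_eq_flatMap,
          List.nil_append, PySem.List.pyRange_zero_natCast, List.flatMap_map, List.map_map]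
        apply List.flatMap_congr
        intro a ha
        have ha' : a < n := List.mem_range.mp ha
        try apply List.map_congr_left
        intro b hb
        have hb' : b < n := List.mem_range.mp hb
        try simp only [Function.comp]
        rw [entry_take_drop_rev src n n b a hge hb' ha']
        have a2 : (((n - 1 - a : Nat)) : Int) = (n:Int) - 1 - (a:Int) := by omega
        rw [show (b:Int) * (n:Int) + ((n:Int) - 1 - (a:Int)) = ((b * n + (n - 1 - a) : Nat) : Int) by push_cast [a2]; ring,
          PySem.List.pyGetD_natCast]
      · have hnil : PySem.List.pyRange 0 row 1 = [] := PySem.List.pyRange_one_eq_nil (by omega)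
        simp [hnil]
    · simp only [hrc, if_false, ite_false]
      by_cases hrow : 0 < row
      · obtain ⟨r, rfl⟩ := Int.eq_ofNat_of_zero_le (le_of_lt hrow)
        rw [LA1 _ r (by simp [PySem.List.length_pyRange_one])]
        rw [LA4 _ r (by simp [PySem.List.length_pyRange_one])]
        simp only [PySem.List.pyRange_zero_natCast, List.map_map,
          PySem.List.foldl_append_singleton_eq_map, List.nil_append, List.flatMap_id',
          rev_map_range, PySem.List.slice?_none_none_neg_one, Option.getD_some, List.map_map]
        try apply congrArg List.flatten
        try apply List.map_congr_left
        try intro k hk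
        try simp only [Function.comp]
        try rfl
      · have hnil : PySem.List.pyRange 0 row 1 = [] := PySem.List.pyRange_one_eq_nil (by omega)
        simp [hnil]
  -- branch (hflip=True, vflip=True, transpose_bit=False)
  · by_cases hrow : 0 < row
    · obtain ⟨r, rfl⟩ := Int.eq_ofNat_of_zero_le (le_of_lt hrow)
      rw [LA1 _ r (by simp [PySem.List.length_pyRange_one])]
      rw [LA4 _ r (by simp [PySem.List.length_pyRange_one])]
      simp only [PySem.List.pyRange_zero_natCast, List.map_map,
        PySem.List.foldl_append_singleton_eq_map, List.nil_append, List.flatMap_id',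
        rev_map_range, PySem.List.slice?_none_none_neg_one, Option.getD_some, List.map_map]
      try apply congrArg List.flatten
      try apply List.map_congr_left
      try intro k hk
      try simp only [Function.comp]
      try rfl
    · have hnil : PySem.List.pyRange 0 row 1 = [] := PySem.List.pyRange_one_eq_nil (by omega)
      simp [hnil]
  -- branch (hflip=True, vflip=True, transpose_bit=True)
  · by_cases hrc : row = col
    · subst hrc
      simp only [eq_self_iff_true, ite_true]
      by_cases hrow : 0 < row
      · obtain ⟨n, rfl⟩ := Int.eq_ofNat_of_zero_le (le_of_lt hrow)
        have hge : n * n ≤ src.length := by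
          by_contra hlt
          push_neg at hlt
          apply hpre
          refine ⟨by omega, rfl, by exact_mod_cast hrow, ?_⟩
          calc (src.length : Int) < ((n*n : Nat) : Int) := by exact_mod_cast hlt
            _ = (n:Int) * (n:Int) := by push_cast; ring
        rw [LA4 _ n (by simp [PySem.List.length_pyRange_one])]
        rw [LA0]
        rw [LA1 _ n (by simp)]
        simp only [List.map_map]
        rw [rev_map_range]
        rw [LA3]
        rw [flatten_map]
        simp only [PySem.List.foldl_append_singleton_eq_map, PySem.List.foldl_append_eq_flatMap,
          List.nil_append, PySem.List.pyRange_zero_natCast, List.flatMap_map, List.map_map]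
        apply List.flatMap_congr
        intro a ha
        have ha' : a < n := List.mem_range.mp ha
        try apply List.map_congr_left
        intro b hb
        have hb' : b < n := List.mem_range.mp hb
        try simp only [Function.comp]
        rw [entry_take_drop_rev src n n (n - 1 - b) a hge (by omega) ha']
        have a1 : (((n - 1 - b : Nat)) : Int) = (n:Int) - 1 - (b:Int) := by omega
        have a2 : (((n - 1 - a : Nat)) : Int) = (n:Int) - 1 - (a:Int) := by omega
        rw [show ((n:Int) - 1 - (b:Int)) * (n:Int) + ((n:Int) - 1 - (a:Int)) = (((n - 1 - b) * n + (n - 1 - a) : Nat) : Int) by push_cast [a1, a2]; ring,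
          PySem.List.pyGetD_natCast]
      · have hnil : PySem.List.pyRange 0 row 1 = [] := PySem.List.pyRange_one_eq_nil (by omega)
        simp [hnil]
    · simp only [hrc, if_false, ite_false]
      by_cases hrow : 0 < row
      · obtain ⟨r, rfl⟩ := Int.eq_ofNat_of_zero_le (le_of_lt hrow)
        rw [LA1 _ r (by simp [PySem.List.length_pyRange_one])]
        rw [LA4 _ r (by simp [PySem.List.length_pyRange_one])]
        simp only [PySem.List.pyRange_zero_natCast, List.map_map,
          PySem.List.foldl_append_singleton_eq_map, List.nil_append, List.flatMap_id',
          rev_map_range, PySem.List.slice?_none_none_neg_one, Option.getD_some, List.map_map]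
        try apply congrArg List.flatten
        try apply List.map_congr_left
        try intro k hk
        try simp only [Function.comp]
        try rfl
      · have hnil : PySem.List.pyRange 0 row 1 = [] := PySem.List.pyRange_one_eq_nil (by omega)
        simp [hnil]

-- ===== VERDICT (by name: the statement is the Claim_ definition above) =====
theorem transform_spec : Claim_equal_transform := by
  intro src row col type _ hpre
  unfold Spec_transform
  exact transform_eq_alt src row col type hpre
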